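-- pv_equiv track=rewrite | github.com/apost71/IRSystem | searchengine/search/engine/TextProcessing.py | make_vocabulary
-- ===== SOURCE A (Python) =====
-- def make_vocabulary(tokens):
--     vocab = {}
--     for token in tokens:
--         n_words = len(token.split(" "))
--         if token not in vocab:
--             vocab[token] = 0
--         vocab[token] += 1*n_words
--     return vocab
-- ===== SOURCE B (Python) =====
-- def make_vocabulary(tokens):
--     vocab = {}
--     for tok in dict.fromkeys(tokens):
--         vocab[tok] = tokens.count(tok) * len(tok.split(" "))
--     return vocab
-- ===== Notes on version B (the rewrite author's own statement) =====
-- stated objective: alternative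
-- what changed: B first dedupes tokens into first-occurrence order (dict.fromkeys) and then, for each DISTINCT token, scans the whole list once with tokens.count and multiplies by its word count, instead of A's single accumulating pass that re-splits the token and adds n_words per occurrence.
import Mathlib
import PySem

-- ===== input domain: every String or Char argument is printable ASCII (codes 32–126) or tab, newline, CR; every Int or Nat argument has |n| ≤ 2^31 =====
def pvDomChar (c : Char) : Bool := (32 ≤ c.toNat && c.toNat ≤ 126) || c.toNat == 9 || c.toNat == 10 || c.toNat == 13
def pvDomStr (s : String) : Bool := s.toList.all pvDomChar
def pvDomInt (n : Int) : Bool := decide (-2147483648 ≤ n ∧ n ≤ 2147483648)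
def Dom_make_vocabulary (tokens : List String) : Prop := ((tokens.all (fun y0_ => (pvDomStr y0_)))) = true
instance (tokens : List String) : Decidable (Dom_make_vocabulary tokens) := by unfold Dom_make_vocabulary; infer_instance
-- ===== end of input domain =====

-- B replaces A's single accumulating pass by dedupe-then-count: for each distinct token
-- (first-occurrence order) it scans the list once with count and weights by word count;
-- same return value (objective: alternative).

-- ===== PORT A =====
-- one accumulating dict loop: ensure key, then vocab[token] += 1*n_words
def make_vocabulary (tokens : List String) : List (String × Int) :=
  (tokens.foldl (fun vocab token =>
      let n_words : Int := ((PySem.Str.split? token " ").getD []).length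
      let vocab := if vocab.contains token then vocab else vocab.insert token 0
      vocab.modify token 0 (· + 1 * n_words)
    ) PySem.Dict.empty).items

-- ===== PORT B =====
-- for tok in dict.fromkeys(tokens): vocab[tok] = tokens.count(tok) * len(tok.split(" "))
def make_vocabulary_alt (tokens : List String) : List (String × Int) :=
  ((PySem.List.dedup tokens).foldl (fun vocab tok =>
      vocab.insert tok ((PySem.List.count tokens tok) *
        (((PySem.Str.split? tok " ").getD []).length : Int))
    ) PySem.Dict.empty).items

-- ===== PRECONDITION & SPEC =====
def Spec_make_vocabulary (tokens : List String) (out : List (String × Int)) : Prop := out = make_vocabulary_alt tokens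
instance (tokens : List String) (out : List (String × Int)) : Decidable (Spec_make_vocabulary tokens out) := by unfold Spec_make_vocabulary; infer_instance

-- ===== CLAIM (what is proved, stated in full; the proofs are below) =====
def Claim_equal_make_vocabulary : Prop := ∀ (tokens : List String), Dom_make_vocabulary tokens → Spec_make_vocabulary tokens (make_vocabulary tokens)

-- ===== LEMMAS AND PROOFS =====

-- weight of a token
def pvW (t : String) : Int := (((PySem.Str.split? t " ").getD []).length : Int)

-- A's loop body equals a single modify (the conditional insert of 0 is absorbed)
lemma stepA_eq_modify (d : PySem.Dict String Int) (t : String) :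
    (if d.contains t then d else d.insert t 0).modify t 0 (· + 1 * pvW t)
      = d.modify t 0 (· + pvW t) := by
  by_cases h : d.contains t = true
  · simp [h, PySem.Dict.modify, one_mul]
  · have h' : d.contains t = false := by simpa using h
    simp [h', PySem.Dict.modify, PySem.Dict.getD_insert_self, PySem.Dict.insert_insert_self,
      PySem.Dict.getD_of_not_contains d 0 h', one_mul]

lemma getD_foldA (l : List String) (d : PySem.Dict String Int) (v : String) :
    (l.foldl (fun d t => d.modify t 0 (· + pvW t)) d).getD v 0
      = d.getD v 0 + (l.count v : Int) * pvW v := by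
  induction l generalizing d with
  | nil => simp
  | cons x xs ih =>
      simp only [List.foldl_cons, ih, List.count_cons]
      by_cases hx : x = v
      · subst hx
        rw [PySem.Dict.getD_modify_self]
        simp only [BEq.rfl, if_pos]
        push_cast
        ring
      · rw [PySem.Dict.getD_modify_of_ne d 0 _ (fun h => hx h.symm)]
        simp only [beq_iff_eq, hx, if_false]
        push_cast
        ring

-- ===== VERDICT (by name: the statement is the Claim_ definition above) =====
theorem make_vocabulary_spec : Claim_equal_make_vocabulary := by
  intro tokens hdom
  clear hdom
  show make_vocabulary tokens = make_vocabulary_alt tokens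
  unfold make_vocabulary make_vocabulary_alt
  -- B side: inserts over fresh distinct keys append
  rw [PySem.Dict.items_foldl_insert_fresh (l := PySem.List.dedup tokens)
      (d := PySem.Dict.empty) (k := fun t => t)
      (v := fun tok => ((PySem.List.count tokens tok : Int) *
        (((PySem.Str.split? tok " ").getD []).length : Int)))
      (fun a _ => rfl) (by simp)]
  -- A side: replace the loop body by a single modify, then read the items off
  have hfold : tokens.foldl (fun vocab token =>
      let n_words : Int := ((PySem.Str.split? token " ").getD []).length
      let vocab := if vocab.contains token then vocab else vocab.insert token 0
      vocab.modify token 0 (· + 1 * n_words)) PySem.Dict.empty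
      = tokens.foldl (fun d t => d.modify t 0 (· + pvW t)) PySem.Dict.empty := by
    induction tokens using List.reverseRecOn with
    | nil => rfl
    | append_singleton xs x ih =>
        rw [List.foldl_append, List.foldl_append, ih,
          List.foldl_cons, List.foldl_nil, List.foldl_cons, List.foldl_nil]
        exact stepA_eq_modify _ x
  rw [hfold]
  have hnd : (tokens.foldl (fun d t => d.modify t 0 (· + pvW t)) PySem.Dict.empty).keys.Nodup := by
    exact PySem.Dict.nodup_keys_foldl_modify_key tokens (fun x => x) 0
      (fun d x => (· + pvW x)) PySem.Dict.empty (by simp)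
  rw [PySem.Dict.items_eq_map_keys _ hnd 0]
  have hkeys : (tokens.foldl (fun d t => d.modify t 0 (· + pvW t)) PySem.Dict.empty).keys
      = PySem.Set.ofList tokens := by
    rw [PySem.Dict.keys_foldl_modify]
    simp [PySem.Set.update, PySem.Set.ofList, PySem.Dict.keys_empty]
  rw [hkeys]
  have hdd : PySem.List.dedup tokens = PySem.Set.ofList tokens := PySem.List.dedup_eq_ofList tokens
  rw [hdd]
  apply List.map_congr_left
  intro k _
  rw [getD_foldA]
  simp [pvW, PySem.List.count_eq]
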